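-- pv_equiv track=rewrite | github.com/amanda-janate/Python-class | modulo4/aula131.py | encontrar_dup
-- ===== SOURCE A (Python) =====
-- def encontrar_dup(lista):
--     indice_rep = -1
--     num_rep = -1
--
--     for indice, i in enumerate(lista):
--         for indice2, j in enumerate(lista):
--             if i == j and indice2 != indice:
--                 if indice_rep == -1 or indice2 < indice_rep:
--                     if indice_rep != -1 and indice_rep < indice:
--                         break
--                     indice_rep = indice2
--                     num_rep = i
--     return num_rep
-- ===== SOURCE B (Python) =====
-- def encontrar_dup(lista):
--     vistos = set()
--     for v in lista:
--         if v in vistos: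
--             return v
--         vistos.add(v)
--     return -1
-- ===== Notes on version B (the rewrite author's own statement) =====
-- stated objective: faster
-- what changed: Replaces the quadratic nested scans with one linear pass keeping a set of already-seen values and returning the first value seen twice (which is exactly the element whose second occurrence index is minimal, the value A's index tie-break computes).
import Mathlib
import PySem

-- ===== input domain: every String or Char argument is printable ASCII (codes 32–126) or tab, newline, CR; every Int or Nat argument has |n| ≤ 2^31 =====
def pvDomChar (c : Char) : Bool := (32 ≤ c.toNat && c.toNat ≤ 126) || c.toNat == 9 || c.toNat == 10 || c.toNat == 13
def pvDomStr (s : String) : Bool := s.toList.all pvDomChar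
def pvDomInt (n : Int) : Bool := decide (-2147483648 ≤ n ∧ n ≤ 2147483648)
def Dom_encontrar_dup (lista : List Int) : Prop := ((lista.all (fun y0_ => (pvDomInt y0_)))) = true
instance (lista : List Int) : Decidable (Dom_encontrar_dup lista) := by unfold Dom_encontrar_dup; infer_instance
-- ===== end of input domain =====

-- B replaces A's nested scans by one pass over the list with a set of already-seen values.

-- ===== PORT A =====
-- inner `for indice2, j in enumerate(lista)` loop of A, over state (indice_rep, num_rep);
-- `break` is modelled by returning the current state unchanged.
def innerA (t i : Int) : List (Int × Int) → Int × Int → Int × Int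
  | [], st => st
  | (k, j) :: rest, st =>
    if i = j ∧ k ≠ t then
      if st.1 = -1 ∨ k < st.1 then
        if st.1 ≠ -1 ∧ st.1 < t then st   -- break
        else innerA t i rest (k, i)
      else innerA t i rest st
    else innerA t i rest st

def encontrar_dup (lista : List Int) : Int :=
  ((PySem.List.enumerate lista 0).foldl
    (fun st p => innerA p.1 p.2 (PySem.List.enumerate lista 0) st) (-1, -1)).2

-- ===== PORT B =====
-- one pass; `vistos` is the Python set of already-seen values
def bLoop : List Int → PySem.Set Int → Int
  | [], _ => -1
  | v :: rest, vistos =>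
    if PySem.Set.contains vistos v then v else bLoop rest (PySem.Set.add vistos v)

def encontrar_dup_alt (lista : List Int) : Int := bLoop lista PySem.Set.empty

-- ===== PRECONDITION & SPEC =====
def Spec_encontrar_dup (lista : List Int) (out : Int) : Prop := out = encontrar_dup_alt lista
instance (lista : List Int) (out : Int) : Decidable (Spec_encontrar_dup lista out) := by unfold Spec_encontrar_dup; infer_instance

-- ===== CLAIM (what is proved, stated in full; the proofs are below) =====
def Claim_equal_encontrar_dup : Prop := ∀ (lista : List Int), Dom_encontrar_dup lista → Spec_encontrar_dup lista (encontrar_dup lista)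

-- ===== LEMMAS AND PROOFS =====

-- reduced effect of one inner scan: only the FIRST qualifying pair can matter
def stepR (enum : List (Int × Int)) (t i : Int) (st : Int × Int) : Int × Int :=
  match enum.find? (fun q => q.2 == i && q.1 != t) with
  | none => st
  | some (m, _) =>
    if st.1 = -1 ∨ m < st.1 then
      if st.1 ≠ -1 ∧ st.1 < t then st else (m, i)
    else st

theorem innerA_frozen (t i : Int) (enum : List (Int × Int)) (st : Int × Int)
    (h1 : st.1 ≠ -1) (h2 : ∀ p ∈ enum, p.2 = i → p.1 ≠ t → st.1 ≤ p.1) :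
    innerA t i enum st = st := by
  induction enum with
  | nil => rfl
  | cons hd rest ih =>
    obtain ⟨k, j⟩ := hd
    simp only [innerA]
    by_cases hq : i = j ∧ k ≠ t
    · have hk : st.1 ≤ k := h2 (k, j) (by simp) hq.1.symm hq.2
      rw [if_pos hq, if_neg (by omega : ¬ (st.1 = -1 ∨ k < st.1))]
      exact ih (fun p hp => h2 p (List.mem_cons_of_mem _ hp))
    · rw [if_neg hq]
      exact ih (fun p hp => h2 p (List.mem_cons_of_mem _ hp))

theorem innerA_eq_stepR (t i : Int) (enum : List (Int × Int)) (st : Int × Int)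
    (h0 : ∀ p ∈ enum, (0:Int) ≤ p.1)
    (hp : enum.Pairwise (fun a b => a.1 < b.1)) :
    innerA t i enum st = stepR enum t i st := by
  induction enum with
  | nil => rfl
  | cons hd rest ih =>
    obtain ⟨k, j⟩ := hd
    have hk0 : (0:Int) ≤ k := h0 (k, j) (by simp)
    have hrest0 : ∀ p ∈ rest, (0:Int) ≤ p.1 := fun p hp' => h0 p (List.mem_cons_of_mem _ hp')
    have hklt : ∀ p ∈ rest, k < p.1 := (List.pairwise_cons.mp hp).1
    have hrestp : rest.Pairwise (fun a b => a.1 < b.1) := (List.pairwise_cons.mp hp).2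
    by_cases hq : i = j ∧ k ≠ t
    · have hb : (((k, j) : Int × Int).2 == i && ((k, j) : Int × Int).1 != t) = true := by
        simp [hq.1.symm, hq.2]
      simp only [innerA, stepR, List.find?_cons, hb]
      rw [if_pos hq]
      by_cases h1 : st.1 = -1 ∨ k < st.1
      · rw [if_pos h1, if_pos h1]
        by_cases h2 : st.1 ≠ -1 ∧ st.1 < t
        · rw [if_pos h2, if_pos h2]
        · rw [if_neg h2, if_neg h2]
          exact innerA_frozen t i rest (k, i) (by simp only []; omega)
            (fun p hp' _ _ => le_of_lt (hklt p hp'))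
      · rw [if_neg h1, if_neg h1]
        push Not at h1
        exact innerA_frozen t i rest st h1.1
          (fun p hp' _ _ => le_trans h1.2 (le_of_lt (hklt p hp')))
    · have hb : (((k, j) : Int × Int).2 == i && ((k, j) : Int × Int).1 != t) = false := by
        by_cases hji : j = i
        · have hkt : k = t := by
            by_contra hkt
            exact hq ⟨hji.symm, hkt⟩
          simp [hkt]
        · simp [hji]
      simp only [innerA, stepR, List.find?_cons, hb]
      rw [if_neg hq]
      exact ih hrest0 hrestp

theorem A_eq_fold (lista : List Int) :
    encontrar_dup lista
      = ((PySem.List.enumerate lista 0).foldl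
          (fun st p => stepR (PySem.List.enumerate lista 0) p.1 p.2 st) (-1, -1)).2 := by
  unfold encontrar_dup
  congr 2
  funext st p
  exact innerA_eq_stepR p.1 p.2 _ st
    (by intro q hq
        rw [PySem.List.mem_enumerate_iff] at hq
        obtain ⟨k, hk, rfl⟩ := hq
        simp)
    (PySem.List.pairwise_lt_enumerate _ _)

-- generic foldl invariant
theorem foldl_inv {α β : Type} (f : β → α → β) (P : β → Prop) (l : List α) (b : β)
    (h0 : P b) (hstep : ∀ b' a, a ∈ l → P b' → P (f b' a)) : P (l.foldl f b) := by
  induction l generalizing b with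
  | nil => exact h0
  | cons a l ih =>
    exact ih (f b a) (hstep b a (by simp) h0)
      (fun b' a' ha' => hstep b' a' (List.mem_cons_of_mem _ ha'))

theorem stepR_frozen (enum : List (Int × Int)) (t i : Int) (st : Int × Int)
    (h1 : 0 ≤ st.1) (h2 : st.1 < t) : stepR enum t i st = st := by
  unfold stepR
  cases hf : enum.find? (fun q => q.2 == i && q.1 != t) with
  | none => rfl
  | some p =>
    obtain ⟨m, j⟩ := p
    dsimp only
    by_cases hc : st.1 = -1 ∨ m < st.1
    · rw [if_pos hc, if_pos ⟨by omega, h2⟩]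
    · rw [if_neg hc]

-- A on a duplicate-free list returns -1
theorem A_nodup (lista : List Int) (h : lista.Nodup) : encontrar_dup lista = -1 := by
  rw [A_eq_fold]
  have hfix : ((PySem.List.enumerate lista 0).foldl
      (fun st p => stepR (PySem.List.enumerate lista 0) p.1 p.2 st) (-1, -1)) = (-1, -1) := by
    apply foldl_inv _ (fun st => st = (-1, -1)) _ _ rfl
    intro st p hp hst
    subst hst
    rw [PySem.List.mem_enumerate_iff] at hp
    obtain ⟨k, hk, rfl⟩ := hp
    unfold stepR
    have hnone : (PySem.List.enumerate lista 0).find?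
        (fun q => q.2 == lista[k] && q.1 != ((0:Int) + (k:Nat))) = none := by
      rw [List.find?_eq_none]
      intro q hq
      rw [PySem.List.mem_enumerate_iff] at hq
      obtain ⟨m, hm, rfl⟩ := hq
      simp only [Bool.and_eq_true, beq_iff_eq, bne_iff_ne, ne_eq, not_and, not_not]
      intro hv
      have : m = k := (h.getElem_inj_iff).mp hv
      simp [this]
    rw [hnone]
  rw [hfix]

-- A on lista = l1 ++ v :: l2 with l1 duplicate-free and v ∈ l1 returns v
theorem A_dup (l1 l2 : List Int) (v : Int) (hnd : l1.Nodup) (hv : v ∈ l1) :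
    encontrar_dup (l1 ++ v :: l2) = v := by
  rw [A_eq_fold]
  set L : List Int := l1 ++ v :: l2 with hL
  set E : List (Int × Int) := PySem.List.enumerate L 0 with hE
  set d : Int := (l1.length : Int) with hd
  set f : Int × Int → Int × Int → Int × Int := fun st p => stepR E p.1 p.2 st with hf
  -- indices below d are exactly l1's positions, and l1 is duplicate-free,
  -- so a prefix step can only install an index ≥ d
  have prefix_inv : ∀ st p, p ∈ PySem.List.enumerate l1 0 →
      (st = (-1, -1) ∨ d ≤ st.1) → (f st p = (-1, -1) ∨ d ≤ (f st p).1) := by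
    intro st p hp hst
    rw [PySem.List.mem_enumerate_iff] at hp
    obtain ⟨t', ht', rfl⟩ := hp
    simp only [hf, stepR]
    cases hfind : E.find? (fun q => q.2 == l1[t'] && q.1 != ((0:Int) + (t':Nat))) with
    | none => exact hst
    | some r =>
      obtain ⟨m, j⟩ := r
      dsimp only
      have hmem := List.mem_of_find?_eq_some hfind
      have hpred := List.find?_some hfind
      rw [hE, PySem.List.mem_enumerate_iff] at hmem
      obtain ⟨km, hkm, hr⟩ := hmem
      simp only [Bool.and_eq_true, beq_iff_eq, bne_iff_ne] at hpred
      have hm : m = (0:Int) + (km:Nat) := by rw [Prod.ext_iff] at hr; exact hr.1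
      have hj : j = L[km] := by rw [Prod.ext_iff] at hr; exact hr.2
      have hdm : d ≤ m := by
        by_contra hlt
        push Not at hlt
        have hkmd : km < l1.length := by omega
        have hLkm : L[km] = l1[km] := List.getElem_append_left hkmd
        have : l1[km] = l1[t'] := by rw [← hLkm, ← hj]; exact hpred.1
        have : km = t' := (hnd.getElem_inj_iff).mp this
        exact hpred.2 (by omega)
      by_cases h1 : st.1 = -1 ∨ m < st.1
      · rw [if_pos h1]
        by_cases h2 : st.1 ≠ -1 ∧ st.1 < (0:Int) + (t':Nat)
        · rw [if_pos h2]; exact hst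
        · rw [if_neg h2]; right; exact hdm
      · rw [if_neg h1]; exact hst
  -- the step at position d installs (first index of v, v)
  have at_d : ∀ st, (st = (-1, -1) ∨ d ≤ st.1) →
      ∃ m0, f st (0 + d, v) = (m0, v) ∧ 0 ≤ m0 ∧ m0 < d := by
    intro st hst
    obtain ⟨j0, hj0, hval⟩ := List.mem_iff_getElem.mp hv
    have hsome1 : ((PySem.List.enumerate l1 0).find?
        (fun q => q.2 == v && q.1 != (0 + d))).isSome = true := by
      rw [List.find?_isSome]
      refine ⟨((0:Int) + (j0:Nat), l1[j0]), ?_, ?_⟩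
      · rw [PySem.List.mem_enumerate_iff]; exact ⟨j0, hj0, rfl⟩
      · simp only [Bool.and_eq_true, beq_iff_eq, bne_iff_ne]
        exact ⟨hval, by rw [hd]; omega⟩
    obtain ⟨r, hr⟩ := Option.isSome_iff_exists.mp hsome1
    have hfindE : E.find? (fun q => q.2 == v && q.1 != (0 + d)) = some r := by
      rw [hE, hL, PySem.List.enumerate_append, List.find?_append, hr, Option.some_or]
    have hmem := List.mem_of_find?_eq_some hr
    have hpred := List.find?_some hr
    rw [PySem.List.mem_enumerate_iff] at hmem
    obtain ⟨km, hkm, hreq⟩ := hmem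
    simp only [Bool.and_eq_true, beq_iff_eq, bne_iff_ne] at hpred
    have hm1 : r.1 = (0:Int) + (km:Nat) := by rw [hreq]
    obtain ⟨rm, rj⟩ := r
    refine ⟨rm, ?_, by omega, by rw [hd]; omega⟩
    simp only [hf, stepR, hfindE]
    have hc1 : st.1 = -1 ∨ rm < st.1 := by
      rcases hst with h | h
      · left; rw [h]
      · right; omega
    rw [if_pos hc1]
    have hc2 : ¬ (st.1 ≠ -1 ∧ st.1 < 0 + d) := by
      rcases hst with h | h
      · rw [h]; simp
      · intro ⟨_, hlt⟩; omega
    rw [if_neg hc2]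
  -- after position d the state is frozen
  have suffix_inv : ∀ (m0 : Int), 0 ≤ m0 → m0 < d → ∀ st p,
      p ∈ PySem.List.enumerate l2 (0 + d + 1) →
      (st = (m0, v)) → (f st p = (m0, v)) := by
    intro m0 hm0 hm0d st p hp hst
    subst hst
    rw [PySem.List.mem_enumerate_iff] at hp
    obtain ⟨k, hk, rfl⟩ := hp
    simp only [hf]
    exact stepR_frozen _ _ _ _ (by simpa using hm0) (by simp only []; omega)
  -- assemble
  have hEsplit : E = PySem.List.enumerate l1 0
      ++ (0 + d, v) :: PySem.List.enumerate l2 (0 + d + 1) := by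
    rw [hE, hL, PySem.List.enumerate_append, PySem.List.enumerate_cons, hd]
  rw [hEsplit, List.foldl_append, List.foldl_cons]
  have hst1 := foldl_inv f (fun st => st = (-1, -1) ∨ d ≤ st.1)
    (PySem.List.enumerate l1 0) (-1, -1) (Or.inl rfl) prefix_inv
  obtain ⟨m0, hstep, hm00, hm0d⟩ :=
    at_d ((PySem.List.enumerate l1 0).foldl f (-1, -1)) hst1
  rw [hstep]
  have := foldl_inv f (fun st => st = (m0, v)) (PySem.List.enumerate l2 (0 + d + 1))
    (m0, v) rfl (suffix_inv m0 hm00 hm0d)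
  rw [this]

-- B-side lemmas
theorem bLoop_mem (l2 : List Int) (v : Int) (l1 : List Int) (seen : PySem.Set Int)
    (hv : v ∈ seen) (hnd : l1.Nodup) (hs : ∀ x ∈ l1, x ∉ seen) :
    bLoop (l1 ++ v :: l2) seen = v := by
  induction l1 generalizing seen with
  | nil =>
    simp only [List.nil_append, bLoop]
    rw [if_pos ((PySem.Set.contains_iff seen v).mpr hv)]
  | cons a l1 ih =>
    simp only [List.cons_append, bLoop]
    rw [if_neg (by
      rw [PySem.Set.contains_iff]
      exact hs a (by simp))]
    refine ih (PySem.Set.add seen a) (by rw [PySem.Set.mem_add]; exact Or.inl hv)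
      hnd.of_cons ?_
    intro x hx
    rw [PySem.Set.mem_add]
    push Not
    exact ⟨hs x (List.mem_cons_of_mem _ hx),
           fun hxa => (List.nodup_cons.mp hnd).1 (hxa ▸ hx)⟩

theorem B_dup (l1 l2 : List Int) (v : Int) (seen : PySem.Set Int)
    (hnd : l1.Nodup) (hv : v ∈ l1) (hs : ∀ x ∈ l1, x ∉ seen) :
    bLoop (l1 ++ v :: l2) seen = v := by
  induction l1 generalizing seen with
  | nil => simp at hv
  | cons a l1 ih =>
    simp only [List.cons_append, bLoop]
    rw [if_neg (by
      rw [PySem.Set.contains_iff]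
      exact hs a (by simp))]
    have hsadd : ∀ x ∈ l1, x ∉ PySem.Set.add seen a := by
      intro x hx
      rw [PySem.Set.mem_add]
      push Not
      exact ⟨hs x (List.mem_cons_of_mem _ hx),
             fun hxa => (List.nodup_cons.mp hnd).1 (hxa ▸ hx)⟩
    rcases List.mem_cons.mp hv with h | h
    · subst h
      exact bLoop_mem l2 v l1 _ (by rw [PySem.Set.mem_add]; exact Or.inr rfl)
        hnd.of_cons hsadd
    · exact ih (PySem.Set.add seen a) hnd.of_cons h hsadd

theorem B_nodup (l : List Int) (seen : PySem.Set Int)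
    (hnd : l.Nodup) (hs : ∀ x ∈ l, x ∉ seen) : bLoop l seen = -1 := by
  induction l generalizing seen with
  | nil => rfl
  | cons a l ih =>
    simp only [bLoop]
    rw [if_neg (by
      rw [PySem.Set.contains_iff]
      exact hs a (by simp))]
    refine ih (PySem.Set.add seen a) hnd.of_cons ?_
    intro x hx
    rw [PySem.Set.mem_add]
    push Not
    exact ⟨hs x (List.mem_cons_of_mem _ hx),
           fun hxa => (List.nodup_cons.mp hnd).1 (hxa ▸ hx)⟩

-- split a duplicate-free list at a member: the prefix extended by it stays duplicate-free
theorem split_first {a : Int} {l : List Int} (h : a ∈ l) (hnd : l.Nodup) :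
    ∃ s t, l = s ++ a :: t ∧ (a :: s).Nodup := by
  obtain ⟨s, t, rfl⟩ := List.append_of_mem h
  refine ⟨s, t, rfl, List.nodup_cons.mpr ⟨?_, hnd.of_append_left⟩⟩
  intro ha
  exact (List.disjoint_of_nodup_append hnd) ha (by simp)

-- first-repeat decomposition of a list with a duplicate
theorem decomp (l : List Int) (h : ¬ l.Nodup) :
    ∃ l1 v l2, l = l1 ++ v :: l2 ∧ l1.Nodup ∧ v ∈ l1 := by
  induction l with
  | nil => exact absurd List.nodup_nil h
  | cons a l ih =>
    by_cases hl : l.Nodup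
    · have ha : a ∈ l := by
        by_contra ha
        exact h (List.nodup_cons.mpr ⟨ha, hl⟩)
      obtain ⟨s, t, heq, hnd2⟩ := split_first ha hl
      exact ⟨a :: s, a, t, by rw [heq]; rfl, hnd2, by simp⟩
    · obtain ⟨l1, v, l2, heq, hnd, hv⟩ := ih hl
      by_cases ha : a ∈ l1
      · obtain ⟨s, t, heq2, hnd2⟩ := split_first ha hnd
        exact ⟨a :: s, a, t ++ v :: l2, by rw [heq, heq2]; simp, hnd2, by simp⟩
      · exact ⟨a :: l1, v, l2, by rw [heq]; rfl, List.nodup_cons.mpr ⟨ha, hnd⟩,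
          List.mem_cons_of_mem _ hv⟩

-- ===== VERDICT (by name: the statement is the Claim_ definition above) =====
theorem encontrar_dup_spec : Claim_equal_encontrar_dup := by
  intro lista _
  unfold Spec_encontrar_dup encontrar_dup_alt
  by_cases h : lista.Nodup
  · rw [A_nodup lista h, B_nodup lista PySem.Set.empty h (by intro x _; simp [PySem.Set.empty])]
  · obtain ⟨l1, v, l2, heq, hnd, hv⟩ := decomp lista h
    rw [heq, A_dup l1 l2 v hnd hv,
        B_dup l1 l2 v PySem.Set.empty hnd hv (by intro x _; simp [PySem.Set.empty])]
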